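-- pv_equiv track=rewrite | github.com/J-Wengler/364-Code-Challenges- | BWT-Matching/Better-BWT-Matching/main.py | generate_first_occurence
-- ===== SOURCE A (Python) =====
-- def generate_first_occurence(last_column):
--     first_col = sorted(last_column)
--     characters = ''.join(set(first_col))
--     first_occurence = {}
--     for character in characters:
--         for i in range(len(first_col)):
--             if first_col[i] == character:
--                 if i is not 0:
--                     first_occurence[character] = i
--                 else:
--                     first_occurence[character] = i
--                 break
--     return first_occurence
-- ===== SOURCE B (Python) =====
-- def generate_first_occurence(last_column):
--     # Count each character, then assign first-occurrence indices as cumulative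
--     # counts over the distinct characters in ascending order (no full sort of
--     # the column, no per-character rescans).
--     counts = {}
--     for ch in last_column:
--         counts[ch] = counts.get(ch, 0) + 1
--     first_occurence = {}
--     total = 0
--     for ch in sorted(counts):
--         first_occurence[ch] = total
--         total += counts[ch]
--     return first_occurence
-- ===== Notes on version B (the rewrite author's own statement) =====
-- stated objective: faster
-- what changed: Replaces sorting the whole column and rescanning it once per distinct character with a single counting pass plus a cumulative-sum sweep over the sorted distinct characters.
import Mathlib
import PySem

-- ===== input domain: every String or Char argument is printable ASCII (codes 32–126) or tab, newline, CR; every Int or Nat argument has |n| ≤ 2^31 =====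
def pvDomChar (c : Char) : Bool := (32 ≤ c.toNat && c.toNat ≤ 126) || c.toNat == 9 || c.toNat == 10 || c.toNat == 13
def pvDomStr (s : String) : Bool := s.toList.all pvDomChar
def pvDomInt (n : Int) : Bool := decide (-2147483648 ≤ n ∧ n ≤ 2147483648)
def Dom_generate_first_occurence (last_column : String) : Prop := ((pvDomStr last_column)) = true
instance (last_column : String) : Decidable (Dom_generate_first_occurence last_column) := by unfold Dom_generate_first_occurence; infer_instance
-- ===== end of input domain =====

-- B replaces A's full sort + per-character rescan of the sorted column by one counting pass and a
-- cumulative-sum sweep over the sorted distinct characters (objective: faster).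
-- Python's ''.join(set(...)) iterates the set in an unspecified hash order; dict outputs are
-- compared ignoring key order, and the ports use the deterministic first-seen order (PySem.Set).

-- ===== PORT A =====
-- inner loop: 'for i in range(len(first_col)): if first_col[i] == character: first_occurence[character] = i; break'
-- (the Python's 'if i is not 0' branch assigns the same value in both arms; kept as the same-armed if)
def pvFirstA (first_col : List Char) (character : Char) : PySem.Dict String Int → List Int → PySem.Dict String Int
  | d, [] => d
  | d, i :: rest =>
      if PySem.List.pyGet? first_col i = some character then
        (if i ≠ 0 then d.insert (String.ofList [character]) i else d.insert (String.ofList [character]) i)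
      else pvFirstA first_col character d rest

def generate_first_occurence (last_column : String) : List (String × Int) :=
  let first_col := PySem.List.sorted last_column.toList (fun x => x) false
  let characters := PySem.Set.ofList first_col
  let first_occurence : PySem.Dict String Int :=
    characters.foldl
      (fun d character =>
        pvFirstA first_col character d (PySem.List.pyRange 0 (first_col.length : Int)))
      PySem.Dict.empty
  first_occurence.items

-- ===== PORT B =====
def generate_first_occurence_alt (last_column : String) : List (String × Int) :=
  let counts : PySem.Dict Char Int :=
    last_column.toList.foldl (fun d ch => d.insert ch (d.getD ch 0 + 1)) PySem.Dict.empty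
  let res :=
    (PySem.List.sorted counts.keys (fun x => x) false).foldl
      (fun (st : PySem.Dict String Int × Int) ch =>
        (st.1.insert (String.ofList [ch]) st.2, st.2 + counts.getD ch 0))
      (PySem.Dict.empty, 0)
  res.1.items

-- ===== PRECONDITION & SPEC =====
def Spec_generate_first_occurence (last_column : String) (out : List (String × Int)) : Prop := out = generate_first_occurence_alt last_column
instance (last_column : String) (out : List (String × Int)) : Decidable (Spec_generate_first_occurence last_column out) := by unfold Spec_generate_first_occurence; infer_instance

-- ===== CLAIM (what is proved, stated in full; the proofs are below) =====
def Claim_equal_generate_first_occurence : Prop := ∀ (last_column : String), Dom_generate_first_occurence last_column → Spec_generate_first_occurence last_column (generate_first_occurence last_column)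

-- ===== LEMMAS AND PROOFS =====

-- the pairs B's cumulative loop emits
def pvScan (cnt : Char → Int) : List Char → Int → List (String × Int)
  | [], _ => []
  | c :: ks, t => (String.ofList [c], t) :: pvScan cnt ks (t + cnt c)

theorem pvMk_injective : Function.Injective (fun c : Char => String.ofList [c]) := by
  intro a b h
  have := congrArg String.toList h
  simp at this
  exact this

theorem pvFoldlAdd_sublist : ∀ (xs acc pre : List Char), acc.Sublist pre →
    (xs.foldl PySem.Set.add acc).Sublist (pre ++ xs) := by
  intro xs
  induction xs with
  | nil => intro acc pre h; simpa using h
  | cons x xs ih =>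
      intro acc pre h
      have hstep : (PySem.Set.add acc x).Sublist (pre ++ [x]) := by
        by_cases hc : x ∈ acc
        · simp only [PySem.Set.add]
          rw [if_pos (by simpa [PySem.Set.contains] using hc)]
          exact h.trans (List.sublist_append_left pre [x])
        · simp only [PySem.Set.add]
          rw [if_neg (by simpa [PySem.Set.contains] using hc)]
          exact h.append (List.Sublist.refl [x])
      have := ih (PySem.Set.add acc x) (pre ++ [x]) hstep
      simpa [List.append_assoc] using this

theorem pvOfList_sublist (xs : List Char) : (PySem.Set.ofList xs).Sublist xs := by
  rw [PySem.Set.ofList_eq_foldl]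
  simpa using pvFoldlAdd_sublist xs [] [] (List.Sublist.refl [])

theorem pvOfList_pairwise_lt (s : List Char) (hs : s.Pairwise (· ≤ ·)) :
    (PySem.Set.ofList s).Pairwise (· < ·) := by
  have hle : (PySem.Set.ofList s).Pairwise (· ≤ ·) := hs.sublist (pvOfList_sublist s)
  have hnd : (PySem.Set.ofList s).Nodup := PySem.Set.nodup_ofList s
  exact (hnd.and hle).imp fun h => lt_of_le_of_ne h.2 h.1

theorem pvIdx_ne (l : List Char) (a : Char) : ∀ (j : Nat) (hj : j < l.length),
    j < l.idxOf a → l[j] ≠ a := by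
  induction l with
  | nil => intro j hj; simp at hj
  | cons b l ih =>
      intro j hj hlt
      by_cases hba : b = a
      · subst hba; simp at hlt
      · cases j with
        | zero => simpa using hba
        | succ j =>
            have : j < l.idxOf a := by
              simp [List.idxOf_cons, hba] at hlt; omega
            simpa using ih j (by simpa using hj) this

theorem pvIdx_eq_countP (s : List Char) (hs : s.Pairwise (· ≤ ·)) (c : Char) (hc : c ∈ s) :
    s.idxOf c = s.countP (fun x => decide (x < c)) := by
  induction s with
  | nil => cases hc
  | cons a s ih =>
      have ha : ∀ x ∈ s, a ≤ x := fun x hx => (List.pairwise_cons.mp hs).1 x hx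
      by_cases hac : a = c
      · subst hac
        have hno : ∀ x ∈ s, ¬ x < a := fun x hx => not_lt.mpr (ha x hx)
        have hcnt : s.countP (fun x => decide (x < a)) = 0 := by
          rw [List.countP_eq_zero]; intro x hx; simpa using hno x hx
        simp [List.idxOf_cons, List.countP_cons, hcnt]
      · have hcs : c ∈ s := by
          rcases List.mem_cons.mp hc with h | h
          · exact absurd h.symm hac
          · exact h
        have halt : a < c := lt_of_le_of_ne (ha c hcs) hac
        have hrec := ih ((List.pairwise_cons.mp hs).2) hcs
        simp [List.idxOf_cons, hac, List.countP_cons, halt, hrec]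

theorem pvCount_split (c : Char) (ks : List Char) (hc : c ∉ ks) : ∀ (s : List Char),
    s.countP (fun x => decide (x ∉ (c :: ks))) + s.count c = s.countP (fun x => decide (x ∉ ks)) := by
  intro s
  induction s with
  | nil => simp
  | cons a s ih =>
      rw [List.countP_cons, List.countP_cons, List.count_cons]
      by_cases hac : a = c
      · subst hac
        rw [if_neg (by simp), if_pos (by simp), if_pos (by simpa using hc)]
        omega
      · by_cases haks : a ∈ ks
        · rw [if_neg (by simp [haks]), if_neg (by simp [hac]), if_neg (by simp [haks])]
          omega
        · rw [if_pos (by simp [hac, haks]), if_neg (by simp [hac]), if_pos (by simp [haks])]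
          omega

-- A's inner scan inserts the first index of c in the sorted column
theorem pvFirstA_spec (s : List Char) (c : Char) (hc : c ∈ s) :
    ∀ (n : Nat) (k : Nat) (d : PySem.Dict String Int), n = s.idxOf c - k → k ≤ s.idxOf c →
    pvFirstA s c d (PySem.List.pyRange (k : Int) (s.length : Int)) =
      d.insert (String.ofList [c]) ((s.idxOf c : Int)) := by
  intro n
  induction n with
  | zero =>
      intro k d hn hk
      have hkeq : k = s.idxOf c := by omega
      subst hkeq
      have hlen : s.idxOf c < s.length := List.idxOf_lt_length_of_mem hc
      rw [PySem.List.pyRange_one_cons (by exact_mod_cast hlen)]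
      have hget : PySem.List.pyGet? s ((s.idxOf c : Nat) : Int) = some c := by
        rw [PySem.List.pyGet?_natCast, List.getElem?_eq_getElem hlen]
        exact congrArg some (List.getElem_idxOf hlen)
      simp [pvFirstA, hget]
  | succ n ih =>
      intro k d hn hk
      have hklt : k < s.idxOf c := by omega
      have hlen : k < s.length := lt_trans hklt (List.idxOf_lt_length_of_mem hc)
      rw [PySem.List.pyRange_one_cons (by exact_mod_cast hlen)]
      have hne : s[k] ≠ c := pvIdx_ne s c k hlen hklt
      have hget : ¬ (PySem.List.pyGet? s (k : Int) = some c) := by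
        rw [PySem.List.pyGet?_natCast, List.getElem?_eq_getElem hlen]
        simpa using hne
      have hcast : (k : Int) + 1 = ((k + 1 : Nat) : Int) := by push_cast; ring
      rw [pvFirstA, if_neg hget, hcast]
      exact ih (k + 1) d (by omega) (by omega)

-- B's pair-state loop appends pvScan to the dict's items
theorem pvFoldB_items (cnt : Char → Int) : ∀ (K : List Char) (d0 : PySem.Dict String Int) (t : Int),
    (∀ c ∈ K, d0.contains (String.ofList [c]) = false) →
    (K.map (fun c => String.ofList [c])).Nodup →
    ((K.foldl (fun (st : PySem.Dict String Int × Int) ch =>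
        (st.1.insert (String.ofList [ch]) st.2, st.2 + cnt ch)) (d0, t)).1).items =
      d0.items ++ pvScan cnt K t := by
  intro K
  induction K with
  | nil => intro d0 t _ _; simp [pvScan]
  | cons c ks ih =>
      intro dd t hfresh hnd
      have hcon : dd.contains (String.ofList [c]) = false := hfresh c (by simp)
      have hfresh' : ∀ x ∈ ks, (dd.insert (String.ofList [c]) t).contains (String.ofList [x]) = false := by
        intro x hx
        have hxc : ¬ (String.ofList [x] = String.ofList [c]) := by
          intro h
          have hx2 : x = c := pvMk_injective h
          subst hx2
          exact (List.nodup_cons.mp hnd).1 (List.mem_map_of_mem hx)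
        rw [PySem.Dict.contains_insert]
        simp only [hfresh x (by simp [hx]), Bool.or_false]
        simpa using hxc
      have hrec := ih (dd.insert (String.ofList [c]) t) (t + cnt c) hfresh' (List.nodup_cons.mp hnd).2
      simp only [List.foldl_cons, hrec, pvScan,
        PySem.Dict.items_insert_of_not_contains dd t hcon, List.append_assoc, List.cons_append,
        List.nil_append]

-- the cumulative sums are exactly the first-occurrence indices in the sorted column
theorem pvScan_eq_map (s : List Char) (hs : s.Pairwise (· ≤ ·)) :
    ∀ (K : List Char) (t : Int), K.Pairwise (· < ·) → (∀ c ∈ K, c ∈ s) →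
    (∀ x ∈ s, x ∈ K ∨ ∀ c ∈ K, x < c) →
    t = (s.countP (fun x => decide (x ∉ K)) : Int) →
    pvScan (fun c => (s.count c : Int)) K t =
      K.map (fun c => (String.ofList [c], (s.idxOf c : Int))) := by
  intro K
  induction K with
  | nil => intro t _ _ _ _; simp [pvScan]
  | cons c ks ih =>
      intro t hpw hmem hlow ht
      have hcks : c ∉ ks := by
        intro h
        exact lt_irrefl c ((List.pairwise_cons.mp hpw).1 c h)
      have hclt : ∀ x ∈ ks, c < x := (List.pairwise_cons.mp hpw).1
      have hpred : ∀ x ∈ s, ((decide (x ∉ (c :: ks)) : Bool) = true ↔ (decide (x < c) : Bool) = true) := by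
        intro x hx
        by_cases hxK : x ∈ (c :: ks)
        · have hnotlt : ¬ x < c := by
            rcases List.mem_cons.mp hxK with h | h
            · simp [h]
            · exact not_lt.mpr (le_of_lt (hclt x h))
          simp [hxK, hnotlt]
        · have hx_lt : x < c := by
            rcases hlow x hx with h | h
            · exact absurd h hxK
            · exact h c (by simp)
          simp [hxK, hx_lt]
      have hcount : s.countP (fun x => decide (x ∉ (c :: ks))) = s.countP (fun x => decide (x < c)) :=
        List.countP_congr hpred
      have hidx : t = (s.idxOf c : Int) := by
        rw [ht, hcount, ← pvIdx_eq_countP s hs c (hmem c (by simp))]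
      have ht' : t + (s.count c : Int) = (s.countP (fun x => decide (x ∉ ks)) : Int) := by
        rw [ht]
        have h6 := pvCount_split c ks hcks s
        push_cast [← h6]
        ring
      have hlow' : ∀ x ∈ s, x ∈ ks ∨ ∀ c' ∈ ks, x < c' := by
        intro x hx
        rcases hlow x hx with h | h
        · rcases List.mem_cons.mp h with h2 | h2
          · subst h2
            exact Or.inr fun c' hc' => hclt c' hc'
          · exact Or.inl h2
        · exact Or.inr fun c' hc' => h c' (by simp [hc'])
      have hrec := ih (t + (s.count c : Int)) ((List.pairwise_cons.mp hpw).2)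
        (fun x hx => hmem x (by simp [hx])) hlow' ht'
      simp only [pvScan, List.map_cons]
      rw [hrec, hidx]

-- ===== VERDICT (by name: the statement is the Claim_ definition above) =====
theorem generate_first_occurence_spec : Claim_equal_generate_first_occurence := by
  intro last_column _
  unfold Spec_generate_first_occurence generate_first_occurence generate_first_occurence_alt
  set lc := last_column.toList with hlc
  set s := PySem.List.sorted lc (fun x => x) false with hsdef
  have hperm : s.Perm lc := PySem.List.sorted_perm lc (fun x => x) false
  have hs : s.Pairwise (· ≤ ·) := PySem.List.sorted_pairwise lc (fun x => x)
  set K := PySem.Set.ofList s with hK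
  have hKpw : K.Pairwise (· < ·) := pvOfList_pairwise_lt s hs
  have hKnd : K.Nodup := PySem.Set.nodup_ofList s
  have hKmem : ∀ c ∈ K, c ∈ s := fun c hc => (PySem.Set.mem_ofList s c).mp hc
  have hKndmap : (K.map (fun c => String.ofList [c])).Nodup := hKnd.map pvMk_injective
  -- B's key list is K
  have hkeys : PySem.List.sorted
      (PySem.Dict.keys (lc.foldl (fun d ch => d.insert ch (d.getD ch 0 + 1))
        (PySem.Dict.empty : PySem.Dict Char Int)))
      (fun x => x) false = K := by
    have h1 : (lc.foldl (fun d ch => d.insert ch (d.getD ch 0 + 1))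
        (PySem.Dict.empty : PySem.Dict Char Int)).keys
        = PySem.Set.ofList lc := by
      rw [PySem.Dict.keys_foldl_insert lc (fun d x => d.getD x 0 + 1) PySem.Dict.empty]
      rw [PySem.Set.ofList_eq_foldl]
      simp [PySem.Set.update, PySem.Dict.keys_empty]
    rw [h1]
    apply PySem.List.sorted_eq_of_perm_of_pairwise_lt
    · exact (List.perm_ext_iff_of_nodup hKnd (PySem.Set.nodup_ofList lc)).mpr (by
        intro a
        rw [PySem.Set.mem_ofList, PySem.Set.mem_ofList]
        exact ⟨fun h => hperm.mem_iff.mp h, fun h => hperm.mem_iff.mpr h⟩)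
    · exact hKpw
  -- B's per-key count is s.count
  have hcnt : ∀ c, (lc.foldl (fun d ch => d.insert ch (d.getD ch 0 + 1))
      (PySem.Dict.empty : PySem.Dict Char Int)).getD c 0
      = (s.count c : Int) := by
    intro c
    rw [PySem.Dict.getD_foldl_insert_add_one lc PySem.Dict.empty c, PySem.Dict.getD_empty]
    rw [hperm.count_eq c]
    ring
  -- A side: each pvFirstA call is a fresh insert of the first index
  have hA : (K.foldl (fun d character => pvFirstA s character d
        (PySem.List.pyRange 0 (s.length : Int))) PySem.Dict.empty).items
      = K.map (fun c => (String.ofList [c], (s.idxOf c : Int))) := by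
    have hcongr : K.foldl (fun d character => pvFirstA s character d
          (PySem.List.pyRange 0 (s.length : Int))) PySem.Dict.empty
        = K.foldl (fun d c => d.insert (String.ofList [c]) ((s.idxOf c : Int))) PySem.Dict.empty := by
      apply PySem.List.foldl_congr_mem
      intro d c hc
      have h0 : ((0 : Nat) : Int) = (0 : Int) := rfl
      rw [← h0]
      exact pvFirstA_spec s c (hKmem c hc) (s.idxOf c) 0 d (by omega) (by omega)
    rw [hcongr]
    rw [PySem.Dict.items_foldl_insert_fresh K (fun c => String.ofList [c]) (fun c => (s.idxOf c : Int))
      PySem.Dict.empty (fun a _ => PySem.Dict.contains_empty _) hKndmap]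
    rfl
  -- B side
  have hBfold : ((K.foldl (fun (st : PySem.Dict String Int × Int) ch =>
        (st.1.insert (String.ofList [ch]) st.2, st.2 + (s.count ch : Int))) (PySem.Dict.empty, 0)).1).items
      = pvScan (fun c => (s.count c : Int)) K 0 := by
    rw [pvFoldB_items (fun c => (s.count c : Int)) K PySem.Dict.empty 0
      (fun c _ => PySem.Dict.contains_empty _) hKndmap]
    rfl
  have hlow : ∀ x ∈ s, x ∈ K ∨ ∀ c ∈ K, x < c := by
    intro x hx
    exact Or.inl ((PySem.Set.mem_ofList s x).mpr hx)
  have hscan : pvScan (fun c => (s.count c : Int)) K 0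
      = K.map (fun c => (String.ofList [c], (s.idxOf c : Int))) := by
    apply pvScan_eq_map s hs K 0 hKpw hKmem hlow
    have hz : s.countP (fun x => decide (x ∉ K)) = 0 := by
      rw [List.countP_eq_zero]
      intro x hx
      simp only [decide_eq_true_eq, Decidable.not_not]
      exact (PySem.Set.mem_ofList s x).mpr hx
    rw [hz]
    simp
  have hBcongr : K.foldl (fun (st : PySem.Dict String Int × Int) ch =>
        (st.1.insert (String.ofList [ch]) st.2,
         st.2 + (lc.foldl (fun d ch => d.insert ch (d.getD ch 0 + 1))
           (PySem.Dict.empty : PySem.Dict Char Int)).getD ch 0))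
        (PySem.Dict.empty, 0)
      = K.foldl (fun (st : PySem.Dict String Int × Int) ch =>
        (st.1.insert (String.ofList [ch]) st.2, st.2 + (s.count ch : Int))) (PySem.Dict.empty, 0) :=
    PySem.List.foldl_congr_mem _ _ _ _ (by intro acc x hx; rw [hcnt x])
  dsimp only
  rw [(hK.symm : PySem.Set.ofList s = K), hkeys, hA, hBcongr, hBfold, hscan]
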